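-- pv_equiv track=rewrite | github.com/AnuKritiW/git-at-soc | Problem Set 1/solutions/pset1_Chelsea.py | calcPosts
-- ===== SOURCE A (Python) =====
-- from enum import Enum
--
-- def calcPosts(parcel):
-- 	numPosts = 0
-- 	gradient = Enum('down', 'up')
-- 	prevGradient = None
-- 	currGradient = None
--
-- 	for k in range(1, len(parcel)):
-- 		# Put post on mark = 0 and set first gradient
-- 		if parcel[k - 1] < parcel[k]:
-- 			currGradient = 'up'
-- 		elif parcel[k - 1] > parcel[k]:
-- 			currGradient = 'down'
--
-- 		# Set prevGradient for the first slope encountered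
-- 		if prevGradient == None:
-- 			prevGradient = currGradient
--
-- 		if currGradient != prevGradient:
-- 			numPosts += 1
-- 			prevGradient = None
--
-- 	return numPosts
-- ===== SOURCE B (Python) =====
-- def calcPosts(parcel):
--     # Phase 1: effective gradient at each step, flats carry the previous gradient
--     # (None while no slope has been seen yet).
--     grads = []
--     g = None
--     for x, y in zip(parcel, parcel[1:]):
--         if x < y:
--             g = 'up'
--         elif x > y:
--             g = 'down'
--         grads.append(g)
--     # Phase 2: scan adjacent gradients; a counted change absorbs the next step,
--     # so jump by 2 after counting.
--     posts = 0
--     i = 1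
--     while i < len(grads):
--         if grads[i] != grads[i - 1] and grads[i - 1] is not None:
--             posts += 1
--             i += 2
--         else:
--             i += 1
--     return posts
-- ===== Notes on version B (the rewrite author's own statement) =====
-- stated objective: alternative
-- what changed: A's single-pass prev/curr state machine with reset is replaced by two phases: first build the carried-gradient list, then count direction changes by comparing adjacent gradients, jumping two positions after each counted change instead of keeping a reset baseline.
import Mathlib
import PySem

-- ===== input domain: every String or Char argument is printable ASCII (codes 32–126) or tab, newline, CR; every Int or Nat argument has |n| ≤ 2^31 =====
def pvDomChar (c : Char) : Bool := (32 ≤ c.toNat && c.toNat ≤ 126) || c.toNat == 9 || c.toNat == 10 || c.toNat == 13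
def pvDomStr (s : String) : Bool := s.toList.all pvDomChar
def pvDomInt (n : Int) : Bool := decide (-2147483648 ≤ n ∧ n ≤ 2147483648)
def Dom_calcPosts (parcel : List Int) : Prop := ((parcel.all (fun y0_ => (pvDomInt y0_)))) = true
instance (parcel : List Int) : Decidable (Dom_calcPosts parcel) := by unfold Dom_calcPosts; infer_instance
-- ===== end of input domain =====

-- B replaces A's single prev/curr state machine with two phases: build the carried
-- gradient list, then scan adjacent gradients counting changes and skipping one step
-- after each counted change (objective: alternative decomposition, same O(n) cost).

-- ===== PORT A =====
-- loop body of A's `for k in range(1, len(parcel))` (the unused `gradient = Enum(...)` has no effect and is dropped)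
def stepA (st : Int × Option String × Option String) (a b : Int) :
    Int × Option String × Option String :=
  let curr := if a < b then some "up" else if a > b then some "down" else st.2.2
  let prev := if st.2.1 = none then curr else st.2.1
  if curr ≠ prev then (st.1 + 1, (none : Option String), curr) else (st.1, prev, curr)

def calcPosts (parcel : List Int) : Int :=
  ((PySem.List.pyRange 1 (parcel.length : Int)).foldl
    (fun st k => stepA st (PySem.List.pyGetD parcel (k - 1) 0) (PySem.List.pyGetD parcel k 0))
    (0, none, none)).1

-- ===== PORT B =====
-- phase-1 loop body: append the effective gradient, flats carry the previous one
def bStep (acc : List (Option String) × Option String) (xy : Int × Int) :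
    List (Option String) × Option String :=
  let g := if xy.1 < xy.2 then some "up" else if xy.1 > xy.2 then some "down" else acc.2
  (acc.1 ++ [g], g)

-- phase-2 while loop: count adjacent changes, jumping by 2 after a counted change
def countLoop (gs : List (Option String)) (i : Nat) : Int :=
  if h : i < gs.length then
    if gs.getD i none ≠ gs.getD (i - 1) none ∧ gs.getD (i - 1) none ≠ none then
      1 + countLoop gs (i + 2)
    else
      countLoop gs (i + 1)
  else 0
termination_by gs.length - i

def calcPosts_alt (parcel : List Int) : Int :=
  countLoop ((parcel.zip (PySem.List.slice parcel (some 1) none)).foldl bStep ([], none)).1 1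

-- ===== PRECONDITION & SPEC =====
def Spec_calcPosts (parcel : List Int) (out : Int) : Prop := out = calcPosts_alt parcel
instance (parcel : List Int) (out : Int) : Decidable (Spec_calcPosts parcel out) := by unfold Spec_calcPosts; infer_instance

-- ===== CLAIM (what is proved, stated in full; the proofs are below) =====
def Claim_equal_calcPosts : Prop := ∀ (parcel : List Int), Dom_calcPosts parcel → Spec_calcPosts parcel (calcPosts parcel)

-- ===== LEMMAS AND PROOFS =====

-- the effective gradient of one step, given the carried gradient c
def grad (x y : Int) (c : Option String) : Option String :=
  if x < y then some "up" else if x > y then some "down" else c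

-- the carried-gradient list over the pair list
def gradsOf (c : Option String) : List (Int × Int) → List (Option String)
  | [] => []
  | p :: ps => grad p.1 p.2 c :: gradsOf (grad p.1 p.2 c) ps

-- A's counting machine expressed over the gradient list
def machineM : Option String → List (Option String) → Int
  | _, [] => 0
  | prev, g :: rest =>
      if prev ≠ none ∧ g ≠ prev then 1 + machineM none rest else machineM g rest

-- A's index loop reads exactly the adjacent pairs
theorem mapPairs (xs : List Int) :
    (PySem.List.pyRange 1 (xs.length : Int)).map
      (fun k => (PySem.List.pyGetD xs (k - 1) 0, PySem.List.pyGetD xs k 0))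
      = xs.zip xs.tail := by
  apply List.ext_getElem
  · simp [PySem.List.length_pyRange_one]
  · intro i h1 h2
    have hlen : i + 1 < xs.length := by
      simp [List.length_zip, List.length_tail] at h2; omega
    have hilen : i < xs.length := by omega
    rw [List.getElem_map, PySem.List.getElem_pyRange_one]
    rw [show (1 : Int) + (i : Int) - 1 = ((i : Nat) : Int) from by ring]
    rw [show (1 : Int) + (i : Int) = ((i + 1 : Nat) : Int) from by push_cast; ring]
    rw [PySem.List.pyGetD_natCast, PySem.List.pyGetD_natCast]
    rw [List.getD_eq_getElem xs 0 hilen, List.getD_eq_getElem xs 0 hlen]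
    rw [List.getElem_zip]
    simp [List.getElem_tail]

-- A's fold over pairs counts with machineM over the carried gradient list
theorem foldA_machine (ps : List (Int × Int)) :
    ∀ (n : Int) (prev curr : Option String),
      (ps.foldl (fun st p => stepA st p.1 p.2) (n, prev, curr)).1
        = n + machineM prev (gradsOf curr ps) := by
  induction ps with
  | nil => intro n prev curr; simp [gradsOf, machineM]
  | cons p ps ih =>
      intro n prev curr
      simp only [List.foldl_cons, gradsOf]
      by_cases hp : prev = none
      · subst hp
        have : stepA (n, none, curr) p.1 p.2 = (n, grad p.1 p.2 curr, grad p.1 p.2 curr) := by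
          simp [stepA, grad]
        rw [this, ih]
        simp [machineM]
      · by_cases hne : grad p.1 p.2 curr ≠ prev
        · have : stepA (n, prev, curr) p.1 p.2 = (n + 1, none, grad p.1 p.2 curr) := by
            simp only [stepA, grad] at *
            simp [hp, hne]
          rw [this, ih]
          simp [machineM, hp, hne]
          ring
        · simp only [not_not] at hne
          have : stepA (n, prev, curr) p.1 p.2 = (n, prev, grad p.1 p.2 curr) := by
            simp only [stepA, grad] at *
            simp [hp, hne]
          rw [this, ih]
          simp [machineM, hne]
  -- done

-- B's phase-1 fold builds exactly the carried gradient list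
theorem foldB_grads (ps : List (Int × Int)) :
    ∀ (acc : List (Option String)) (g : Option String),
      (ps.foldl bStep (acc, g)).1 = acc ++ gradsOf g ps := by
  induction ps with
  | nil => intro acc g; simp [gradsOf]
  | cons p ps ih =>
      intro acc g
      simp only [List.foldl_cons, bStep, gradsOf, grad]
      rw [ih]
      simp

-- B's phase-2 loop, from index i >= 1, is A's machine resumed with the last seen gradient
theorem countLoop_machine (gs : List (Option String)) :
    ∀ (n i : Nat), gs.length - i ≤ n → 1 ≤ i →
      countLoop gs i = machineM (gs.getD (i - 1) none) (gs.drop i) := by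
  intro n
  induction n with
  | zero =>
      intro i hn _
      have h : ¬ i < gs.length := by omega
      rw [countLoop]
      simp only [h, dif_neg, not_false_iff]
      rw [List.drop_eq_nil_of_le (by omega)]
      simp [machineM]
  | succ n ih =>
      intro i hn hi
      by_cases h : i < gs.length
      · have hgi : gs.getD i none = gs[i] := List.getD_eq_getElem gs none h
        have hdrop : gs.drop i = gs[i] :: gs.drop (i + 1) := List.drop_eq_getElem_cons h
        rw [countLoop]
        simp only [h, dif_pos]
        by_cases hc : gs.getD i none ≠ gs.getD (i - 1) none ∧ gs.getD (i - 1) none ≠ none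
        · rw [if_pos hc, hdrop]
          simp only [machineM]
          rw [if_pos ⟨hc.2, by rw [← hgi]; exact hc.1⟩]
          congr 1
          by_cases h1 : i + 1 < gs.length
          · have hdrop2 : gs.drop (i + 1) = gs[i + 1] :: gs.drop (i + 2) :=
              List.drop_eq_getElem_cons h1
            rw [hdrop2]
            simp only [machineM]
            rw [if_neg (by simp)]
            rw [ih (i + 2) (by omega) (by omega)]
            simp [List.getElem?_eq_getElem h1]
          · rw [List.drop_eq_nil_of_le (by omega)]
            rw [countLoop]
            have h2 : ¬ i + 2 < gs.length := by omega
            simp [h2, machineM]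
        · rw [if_neg hc, hdrop]
          simp only [machineM]
          rw [if_neg (by rw [← hgi]; tauto)]
          rw [ih (i + 1) (by omega) (by omega)]
          simp [List.getElem?_eq_getElem h]
      · rw [countLoop]
        simp only [h, dif_neg, not_false_iff]
        rw [List.drop_eq_nil_of_le (by omega)]
        simp [machineM]

-- starting the machine fresh is B's loop from index 1
theorem machine_countLoop (gs : List (Option String)) :
    machineM none gs = countLoop gs 1 := by
  cases gs with
  | nil => rw [countLoop]; simp [machineM]
  | cons g rest =>
      simp only [machineM]
      rw [if_neg (by simp)]
      rw [countLoop_machine (g :: rest) (g :: rest).length 1 (by omega) (le_refl 1)]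
      simp

-- ===== VERDICT (by name: the statement is the Claim_ definition above) =====
theorem calcPosts_spec : Claim_equal_calcPosts := by
  intro parcel _
  unfold Spec_calcPosts calcPosts calcPosts_alt
  rw [PySem.List.slice_from_one, foldB_grads]
  have hA : (PySem.List.pyRange 1 (parcel.length : Int)).foldl
      (fun st k => stepA st (PySem.List.pyGetD parcel (k - 1) 0) (PySem.List.pyGetD parcel k 0))
      ((0 : Int), (none : Option String), (none : Option String))
      = ((PySem.List.pyRange 1 (parcel.length : Int)).map
          (fun k => (PySem.List.pyGetD parcel (k - 1) 0, PySem.List.pyGetD parcel k 0))).foldl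
          (fun st (p : Int × Int) => stepA st p.1 p.2)
          ((0 : Int), (none : Option String), (none : Option String)) :=
    by rw [List.foldl_map]
  rw [hA, mapPairs, foldA_machine]
  simp [machine_countLoop]
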